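-- pv_equiv track=rewrite | github.com/kunsevitandrew/CodeWars | 5-kyu/Is-my-friend-cheating/main.py | remov_nb
-- ===== SOURCE A (Python) =====
-- def remov_nb(n):
--     answer_lst = []
--     sm = sum((i for i in range(1, n+1)))
--
--     for i in range(1,n+1):
--         for j in range(i, n+1):
--             if sm - (i + j) == i*j:
--                 answer_lst.append((i, j))
--                 answer_lst.append((j, i))
--
--     return sorted(answer_lst, key=lambda x: x[0])
-- ===== SOURCE B (Python) =====
-- def remov_nb(n):
--     # (i, j) is a solution iff (i + 1) * (j + 1) == total + 1, so for each i
--     # the partner j is determined: solve j = (total - i) / (i + 1) and check it.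
--     total = n * (n + 1) // 2
--     res = []
--     for i in range(1, n + 1):
--         q, r = divmod(total - i, i + 1)
--         if r == 0 and 1 <= q <= n:
--             res.append((i, q))
--     return res
-- ===== Notes on version B (the rewrite author's own statement) =====
-- stated objective: faster
-- what changed: B replaces A's O(n^2) double loop over all pairs (i,j) by a single pass that, for each i, solves j = (total - i)/(i + 1) with one divmod and checks that it is an integer in range; the output comes out already sorted by first component, so the final sort disappears too.
-- intended difference: On the rare n where some diagonal i = j solves sum - 2i = i*i (n = 2, 5, 15, 32, 90, ...), A appends the pair (i,i) twice (once per 'order'), while B lists it once; the reversed pair is the same pair, so a single entry is the intended answer. — e.g. on remov_nb(2): A returns [(1, 1), (1, 1)], B returns [(1, 1)]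
import Mathlib
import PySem

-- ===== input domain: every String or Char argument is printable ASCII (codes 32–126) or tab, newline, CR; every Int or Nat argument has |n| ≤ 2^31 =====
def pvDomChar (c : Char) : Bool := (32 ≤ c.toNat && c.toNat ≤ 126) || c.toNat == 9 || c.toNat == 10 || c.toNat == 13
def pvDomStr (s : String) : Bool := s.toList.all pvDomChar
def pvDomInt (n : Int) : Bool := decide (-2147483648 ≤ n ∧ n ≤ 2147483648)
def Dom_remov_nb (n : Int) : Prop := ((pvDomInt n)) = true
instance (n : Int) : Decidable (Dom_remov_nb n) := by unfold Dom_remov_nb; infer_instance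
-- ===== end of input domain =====

-- B replaces A's O(n^2) pair scan by a single pass solving j = (total-i)/(i+1) per i
-- (output already sorted); on the rare diagonal n, A double-counts (i,i) and B lists it once (see D_).


-- ===== PORT A =====
def remov_nb (n : Int) : List (Int × Int) :=
  let sm : Int := (PySem.List.pyRange 1 (n + 1)).sum
  let answer_lst : List (Int × Int) :=
    (PySem.List.pyRange 1 (n + 1)).foldl (fun acc i =>
      (PySem.List.pyRange i (n + 1)).foldl (fun acc2 j =>
        if sm - (i + j) = i * j then (acc2 ++ [(i, j)]) ++ [(j, i)] else acc2) acc) []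
  PySem.List.sorted answer_lst (fun x => x.1) false

-- ===== PORT B =====
-- divmod(total - i, i + 1): the divisor i + 1 is positive inside the loop (i ≥ 1),
-- so Python's divmod is exactly (floordiv, mod) there.
def remov_nb_alt (n : Int) : List (Int × Int) :=
  let total : Int := PySem.Int.floordiv (n * (n + 1)) 2
  (PySem.List.pyRange 1 (n + 1)).foldl (fun res i =>
    let q := PySem.Int.floordiv (total - i) (i + 1)
    let r := PySem.Int.mod (total - i) (i + 1)
    if r = 0 ∧ 1 ≤ q ∧ q ≤ n then res ++ [(i, q)] else res) []

-- ===== PRECONDITION & SPEC =====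
-- On the rare n where some diagonal i = j solves sum - 2i = i*i (n = 2, 5, 15, 32, 90, ...),
-- A appends the pair (i,i) twice (once per 'order'), while B lists it once; the reversed
-- pair is the same pair, so a single entry is the intended answer.
def D_remov_nb (n : Int) : Prop :=
  ∃ i ∈ Finset.Icc 1 n.toNat, ((i : Int) + 1) * ((i : Int) + 1) = (n * n + n) / 2 + 1

-- decide D_ in O(1) via the square root instead of scanning 1..n (proved equivalent)
theorem pvD_dec_iff (n : Int) :
    (1 ≤ n ∧ Int.sqrt ((n * n + n) / 2 + 1) * Int.sqrt ((n * n + n) / 2 + 1) = (n * n + n) / 2 + 1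
      ∧ Int.sqrt ((n * n + n) / 2 + 1) ≤ n + 1) ↔ D_remov_nb n := by
  unfold D_remov_nb
  set m : Int := (n * n + n) / 2 + 1 with hm
  constructor
  · rintro ⟨hn, hsq, hle⟩
    have hm2 : 2 ≤ m := by
      have h2 : (2:Int) ≤ n * n + n := by nlinarith
      have := Int.ediv_le_ediv (by omega : (0:Int) < 2) h2
      omega
    have hs0 : 0 ≤ Int.sqrt m := Int.sqrt_nonneg m
    have hs2 : 2 ≤ Int.sqrt m := by
      rcases (by omega : Int.sqrt m = 0 ∨ Int.sqrt m = 1 ∨ 2 ≤ Int.sqrt m) with h | h | h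
      · rw [h] at hsq; omega
      · rw [h] at hsq; omega
      · exact h
    refine ⟨(Int.sqrt m - 1).toNat, Finset.mem_Icc.2 ⟨by omega, by omega⟩, ?_⟩
    rw [Int.toNat_of_nonneg (by omega : (0:Int) ≤ Int.sqrt m - 1)]
    have he : Int.sqrt m - 1 + 1 = Int.sqrt m := by ring
    rw [he, hsq]
  · rintro ⟨i, hi, hsq⟩
    obtain ⟨h1, h2⟩ := Finset.mem_Icc.1 hi
    have h1' : (1:Int) ≤ (i:Int) := by exact_mod_cast h1
    have h2' : (i:Int) ≤ n.toNat := by exact_mod_cast h2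
    have hs : Int.sqrt m = (i:Int) + 1 := by
      rw [← hsq, Int.sqrt_eq, Int.natAbs_of_nonneg (by omega : (0:Int) ≤ (i:Int) + 1)]
    refine ⟨by omega, ?_, by omega⟩
    rw [hs, hsq]

instance (n : Int) : Decidable (D_remov_nb n) := decidable_of_iff _ (pvD_dec_iff n)

def Spec_remov_nb (n : Int) (out : List (Int × Int)) : Prop := ¬ D_remov_nb n → out = remov_nb_alt n
instance (n : Int) (out : List (Int × Int)) : Decidable (Spec_remov_nb n out) := by unfold Spec_remov_nb; infer_instance

def pvDiffWitness_remov_nb : Int := 2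
def pvDiffWitnessOut_remov_nb : (List (Int × Int)) × (List (Int × Int)) := ([(1, 1), (1, 1)], [(1, 1)])

-- ===== CLAIM (what is proved, stated in full; the proofs are below) =====
def Claim_unchanged_remov_nb : Prop := ∀ (n : Int), Dom_remov_nb n → Spec_remov_nb n (remov_nb n)
def Claim_changed_remov_nb : Prop := Dom_remov_nb (pvDiffWitness_remov_nb) ∧ D_remov_nb (pvDiffWitness_remov_nb) ∧ remov_nb (pvDiffWitness_remov_nb) = pvDiffWitnessOut_remov_nb.1 ∧ remov_nb_alt (pvDiffWitness_remov_nb) = pvDiffWitnessOut_remov_nb.2 ∧ pvDiffWitnessOut_remov_nb.1 ≠ pvDiffWitnessOut_remov_nb.2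
def Claim_exact_remov_nb : Prop := ∀ (n : Int), Dom_remov_nb n → D_remov_nb n → remov_nb n ≠ remov_nb_alt n

-- ===== LEMMAS AND PROOFS =====

def pvJf (t i : Int) : Int := (t + 1) / (i + 1) - 1
abbrev pvP (n t i : Int) : Prop := (i + 1) ∣ (t + 1) ∧ 1 ≤ pvJf t i ∧ pvJf t i ≤ n
abbrev pvQ (n t i : Int) : Prop := (i + 1) ∣ (t + 1) ∧ i ≤ pvJf t i ∧ pvJf t i ≤ n
def pvRaw (n t : Int) : List (Int × Int) :=
  (PySem.List.pyRange 1 (n + 1)).flatMap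
    (fun i => if pvQ n t i then [(i, pvJf t i), (pvJf t i, i)] else [])
def pvT2 (n t : Int) : List (Int × Int) :=
  (PySem.List.pyRange 1 (n + 1)).flatMap
    (fun i => if pvP n t i then (if pvJf t i = i then [(i, i), (i, i)] else [(i, pvJf t i)]) else [])

def pvT (n t : Int) : List (Int × Int) :=
  (PySem.List.pyRange 1 (n + 1)).flatMap
    (fun i => if pvP n t i then [(i, pvJf t i)] else [])

theorem pvKey_iff (t i j : Int) (hi : 1 ≤ i) :
    ((i + 1) ∣ (t + 1) ∧ j = pvJf t i) ↔ (i + 1) * (j + 1) = t + 1 := by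
  unfold pvJf
  constructor
  · rintro ⟨hd, rfl⟩
    have h := Int.mul_ediv_cancel' hd
    linarith [h]
  · intro h
    have hne : (i + 1) ≠ 0 := by omega
    have hdiv : (t + 1) / (i + 1) = j + 1 := by
      rw [← h, Int.mul_ediv_cancel_left _ hne]
    exact ⟨⟨j + 1, h.symm⟩, by omega⟩

theorem pvInv (t i : Int) (hi : 1 ≤ i) (hd : (i + 1) ∣ (t + 1)) (hj : 1 ≤ pvJf t i) :
    (pvJf t i + 1) ∣ (t + 1) ∧ pvJf t (pvJf t i) = i := by
  have h := (pvKey_iff t i (pvJf t i) hi).1 ⟨hd, rfl⟩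
  have h2 : (pvJf t i + 1) * (i + 1) = t + 1 := by linarith [h]
  have h3 := (pvKey_iff t (pvJf t i) i hj).2 h2
  exact ⟨h3.1, h3.2.symm⟩

theorem pvSum_support_two (l : List Int) (c : Int → Nat) (s u : Int) (hl : l.Nodup)
    (h : ∀ i ∈ l, i ≠ s → i ≠ u → c i = 0) :
    (l.map c).sum = (if s ∈ l then c s else 0) + (if u ∈ l ∧ u ≠ s then c u else 0) := by
  induction l with
  | nil => simp
  | cons x xs ih =>
    obtain ⟨hx, hnd⟩ := List.nodup_cons.1 hl
    rw [List.map_cons, List.sum_cons, ih hnd (fun i hi => h i (List.mem_cons_of_mem _ hi))]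
    have hcx : x ≠ s → x ≠ u → c x = 0 := h x List.mem_cons_self
    clear h ih hl hnd
    by_cases hxs : x = s <;> by_cases hxu : x = u <;> by_cases hsm : s ∈ xs <;>
      by_cases hum : u ∈ xs <;> by_cases hus : u = s <;>
      simp_all [List.mem_cons] <;> omega

-- if the count of (a,b) in A's block at i is nonzero, (a,b) is one of the two entries
theorem pvCF_ne (n t a b i : Int)
    (hne : List.count (a, b) (if pvQ n t i then [(i, pvJf t i), (pvJf t i, i)] else []) ≠ 0) :
    pvQ n t i ∧ ((a = i ∧ b = pvJf t i) ∨ (a = pvJf t i ∧ b = i)) := by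
  by_cases hq : pvQ n t i
  · rw [if_pos hq] at hne
    refine ⟨hq, ?_⟩
    have hmem := List.count_pos_iff.1 (Nat.pos_of_ne_zero hne)
    simp only [List.mem_cons, List.not_mem_nil, Prod.mk.injEq, or_false] at hmem
    exact hmem
  · rw [if_neg hq] at hne; simp at hne

theorem pvRaw_perm (n t : Int) : (pvRaw n t).Perm (pvT2 n t) := by
  rw [List.perm_iff_count]
  rintro ⟨a, b⟩
  unfold pvRaw pvT2
  rw [List.count_flatMap, List.count_flatMap]
  simp only [Function.comp_def]
  set R := PySem.List.pyRange 1 (n + 1) with hR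
  have hmem : ∀ i : Int, i ∈ R ↔ 1 ≤ i ∧ i ≤ n := by
    intro i; rw [hR, PySem.List.mem_pyRange_one]; omega
  have hnd : R.Nodup := PySem.List.nodup_pyRange_one _ _
  set CF : Int → Nat := fun i =>
    List.count (a, b) (if pvQ n t i then [(i, pvJf t i), (pvJf t i, i)] else []) with hCF
  set CG : Int → Nat := fun i =>
    List.count (a, b) (if pvP n t i then (if pvJf t i = i then [(i, i), (i, i)] else [(i, pvJf t i)]) else []) with hCG
  -- CF b = 0 unless b's block lists (a,b), which forces a = pvJf t b (or a = b)
  have hCFb : ∀ {x : Int}, x ≠ a → (¬ (pvQ n t x ∧ a = pvJf t x)) → CF x = 0 := by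
    intro x hxa hno
    by_contra hne
    obtain ⟨hq, hcase⟩ := pvCF_ne n t a b x hne
    rcases hcase with ⟨h1, _⟩ | ⟨h1, _⟩
    · exact hxa h1.symm
    · exact hno ⟨hq, h1⟩
  -- support facts
  have hfsupp : ∀ i ∈ R, i ≠ a → i ≠ b → CF i = 0 := by
    intro i _ hia hib
    by_contra hne
    obtain ⟨_, hcase⟩ := pvCF_ne n t a b i hne
    rcases hcase with ⟨h1, _⟩ | ⟨_, h1⟩
    · exact hia h1.symm
    · exact hib h1.symm
  have hgsupp : ∀ i ∈ R, i ≠ a → i ≠ a → CG i = 0 := by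
    intro i _ hia _
    simp only [hCG]
    rw [List.count_eq_zero]
    intro hmem2
    apply hia
    split at hmem2
    · split at hmem2 <;>
        simp only [List.mem_cons, List.not_mem_nil, Prod.mk.injEq, or_false] at hmem2
      · rcases hmem2 with ⟨h, _⟩ | ⟨h, _⟩ <;> exact h.symm
      · exact hmem2.1.symm
    · cases hmem2
  rw [pvSum_support_two R CF a b hnd hfsupp, pvSum_support_two R CG a a hnd hgsupp]
  rw [if_neg (fun hc : a ∈ R ∧ a ≠ a => hc.2 rfl)]
  by_cases haR : a ∈ R
  case neg =>
    rw [if_neg haR, if_neg haR]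
    have : (if b ∈ R ∧ b ≠ a then CF b else 0) = 0 := by
      split
      case isTrue hc =>
        apply hCFb hc.2
        rintro ⟨hq, ha⟩
        have hb1 : 1 ≤ b := (hmem b |>.1 hc.1).1
        have h1 := hq.2.1
        have h2 := hq.2.2
        rw [← ha] at h1 h2
        exact haR ((hmem a).2 ⟨by omega, h2⟩)
      case isFalse => rfl
    omega
  case pos =>
    rw [if_pos haR, if_pos haR]
    obtain ⟨ha1, ha2⟩ := (hmem a).1 haR
    by_cases hPa : pvP n t a
    case neg =>
      have hga : CG a = 0 := by
        simp only [hCG]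
        beta_reduce
        rw [if_neg hPa]
        simp
      have hfa : CF a = 0 := by
        simp only [hCF]
        beta_reduce
        rw [if_neg]
        · simp
        · rintro ⟨hd, hle, hn2⟩
          exact hPa ⟨hd, by omega, hn2⟩
      have hsec : (if b ∈ R ∧ b ≠ a then CF b else 0) = 0 := by
        split
        case isTrue hc =>
          apply hCFb hc.2
          rintro ⟨hq, ha⟩
          obtain ⟨hb1, hb2⟩ := (hmem b).1 hc.1
          have hinv := pvInv t b hb1 hq.1 (by have := hq.2.1; omega)
          rw [← ha] at hinv
          exact hPa ⟨hinv.1, by rw [hinv.2]; omega⟩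
        case isFalse => rfl
      omega
    case pos =>
      obtain ⟨hda, hj1, hj2⟩ := id hPa
      have hinv := pvInv t a ha1 hda hj1
      by_cases hdiag : pvJf t a = a
      case pos =>
        have hga : CG a = CF a := by
          simp only [hCG, hCF]
          beta_reduce
          have hQa : pvQ n t a := ⟨hda, by omega, hj2⟩
          rw [if_pos hPa, if_pos hdiag, if_pos hQa, hdiag]
        have hsec : (if b ∈ R ∧ b ≠ a then CF b else 0) = 0 := by
          split
          case isTrue hc =>
            apply hCFb hc.2
            rintro ⟨hq, ha⟩
            obtain ⟨hb1, _⟩ := (hmem b).1 hc.1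
            have hinvb := pvInv t b hb1 hq.1 (by have := hq.2.1; omega)
            rw [← ha] at hinvb
            -- pvJf t a = b, but pvJf t a = a and b ≠ a
            exact hc.2 (by rw [← hinvb.2, hdiag])
          case isFalse => rfl
        omega
      case neg =>
        have hga : CG a = if b = pvJf t a then 1 else 0 := by
          simp only [hCG]
          beta_reduce
          rw [if_pos hPa, if_neg hdiag]
          by_cases hb : b = pvJf t a
          · simp [List.count_singleton, Prod.ext_iff, hb]
          · rw [if_neg hb, List.count_singleton]
            simp only [beq_iff_eq, Prod.mk.injEq]
            rw [if_neg]
            rintro ⟨_, h2⟩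
            exact hb h2.symm
        by_cases hba : b = pvJf t a
        case pos =>
          subst hba
          have hbR : pvJf t a ∈ R := (hmem _).2 ⟨by omega, hj2⟩
          have hba' : pvJf t a ≠ a := hdiag
          rw [if_pos ⟨hbR, hba'⟩]
          by_cases hle : a ≤ pvJf t a
          case pos =>
            have hfa : CF a = 1 := by
              simp only [hCF]
              beta_reduce
              have hQa : pvQ n t a := ⟨hda, hle, hj2⟩
              rw [if_pos hQa]
              simp [List.count_cons, Ne.symm hdiag, hdiag]
            have hfb : CF (pvJf t a) = 0 := by
              simp only [hCF]
              beta_reduce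
              rw [if_neg]
              · simp
              · rintro ⟨_, hle2, _⟩
                rw [hinv.2] at hle2
                omega
            rw [hga, hfa, hfb, if_pos rfl]
          case neg =>
            have hfa : CF a = 0 := by
              simp only [hCF]
              beta_reduce
              rw [if_neg]
              · simp
              · rintro ⟨_, hle2, _⟩; exact hle hle2
            have hfb : CF (pvJf t a) = 1 := by
              simp only [hCF]
              beta_reduce
              have hQj : pvQ n t (pvJf t a) := ⟨hinv.1, by rw [hinv.2]; omega, by rw [hinv.2]; omega⟩
              rw [if_pos hQj, hinv.2]
              simp [List.count_cons, hdiag, Ne.symm hdiag]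
            rw [hga, hfa, hfb, if_pos rfl]
        case neg =>
          have hfa : CF a = 0 := by
            simp only [hCF]
            beta_reduce
            split
            · rw [List.count_eq_zero]
              simp only [List.mem_cons, List.not_mem_nil, Prod.mk.injEq, or_false]
              rintro (⟨_, h2⟩ | ⟨h1, _⟩)
              · exact hba h2
              · exact hdiag h1.symm
            · simp
          have hsec : (if b ∈ R ∧ b ≠ a then CF b else 0) = 0 := by
            split
            case isTrue hc =>
              apply hCFb hc.2
              rintro ⟨hq, ha⟩
              obtain ⟨hb1, _⟩ := (hmem b).1 hc.1
              have hinvb := pvInv t b hb1 hq.1 (by have := hq.2.1; omega)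
              rw [← ha] at hinvb
              exact hba hinvb.2.symm
            case isFalse => rfl
          rw [hga, hfa, hsec, if_neg hba]

theorem pvSum_eq (n : Int) (hn : 0 ≤ n) :
    (PySem.List.pyRange 1 (n + 1)).sum = PySem.Int.floordiv (n * (n + 1)) 2 := by
  obtain ⟨k, rfl⟩ := Int.eq_ofNat_of_zero_le hn
  clear hn
  induction k with
  | zero => simp [PySem.Int.floordiv]
  | succ m ih =>
    have h1 : ((m + 1 : Nat) : Int) + 1 = ((m : Int) + 1) + 1 := by push_cast; ring
    rw [h1, PySem.List.pyRange_one_succ_right (by omega), List.sum_append, ih]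
    rw [PySem.Int.floordiv_eq_ediv_of_pos (by omega), PySem.Int.floordiv_eq_ediv_of_pos (by omega)]
    have h2 : ((m + 1 : Nat) : Int) * (((m : Int) + 1) + 1) = (m : Int) * ((m : Int) + 1) + (((m:Int) + 1) * 2) := by push_cast; ring
    rw [h2, Int.add_mul_ediv_right _ _ (by omega : (2:Int) ≠ 0)]
    simp

theorem pvFlatMap_single {α : Type} (l : List Int) (g : Int → List α) (a : Int)
    (hl : l.Nodup) (h : ∀ j ∈ l, j ≠ a → g j = []) :
    l.flatMap g = if a ∈ l then g a else [] := by
  induction l with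
  | nil => simp
  | cons x xs ih =>
    rw [List.flatMap_cons]
    by_cases hx : x = a
    · subst hx
      have hrest : xs.flatMap g = [] := by
        rw [List.flatMap_eq_nil_iff]
        intro j hj
        exact h j (List.mem_cons_of_mem _ hj) (fun he => (List.nodup_cons.1 hl).1 (he ▸ hj))
      simp [hrest]
    · rw [h x (List.mem_cons_self) hx, List.nil_append,
        ih (List.nodup_cons.1 hl).2 (fun j hj => h j (List.mem_cons_of_mem _ hj))]
      simp [List.mem_cons, Ne.symm hx]

theorem pvCond_iff (sm i j : Int) (hi : 1 ≤ i) :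
    (sm - (i + j) = i * j) ↔ ((i + 1) ∣ (sm + 1) ∧ j = pvJf sm i) := by
  rw [pvKey_iff sm i j hi]
  have e : (i + 1) * (j + 1) = i * j + i + j + 1 := by ring
  rw [e]
  constructor <;> intro h <;> linarith [h]

theorem pvInner_eq (n sm i : Int) (hi : 1 ≤ i) :
    (PySem.List.pyRange i (n + 1)).flatMap
      (fun j => if sm - (i + j) = i * j then [(i, j), (j, i)] else []) =
    (if pvQ n sm i then [(i, pvJf sm i), (pvJf sm i, i)] else []) := by
  by_cases hd : (i + 1) ∣ (sm + 1)
  · rw [pvFlatMap_single _ _ (pvJf sm i) (PySem.List.nodup_pyRange_one _ _) ?_]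
    · by_cases hm : pvJf sm i ∈ PySem.List.pyRange i (n + 1)
      · rw [if_pos hm, if_pos ((pvCond_iff sm i _ hi).2 ⟨hd, rfl⟩), if_pos]
        have := PySem.List.mem_pyRange_one.1 hm
        exact ⟨hd, this.1, by omega⟩
      · rw [if_neg hm, if_neg]
        intro ⟨_, h2, h3⟩
        exact hm (PySem.List.mem_pyRange_one.2 ⟨h2, by omega⟩)
    · intro j _ hj
      rw [if_neg]
      intro hc
      exact hj ((pvCond_iff sm i j hi).1 hc).2
  · rw [if_neg (fun hq => hd hq.1), List.flatMap_eq_nil_iff]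
    intro j _
    rw [if_neg]
    intro hc
    exact hd ((pvCond_iff sm i j hi).1 hc).1

theorem pvA_eq (n : Int) :
    remov_nb n = PySem.List.sorted (pvRaw n ((PySem.List.pyRange 1 (n + 1)).sum)) (fun x => x.1) false := by
  simp only [remov_nb, pvRaw]
  set sm := (PySem.List.pyRange 1 (n + 1)).sum with hsm
  congr 1
  rw [PySem.List.foldl_congr_mem' _ _
      (fun acc i => acc ++ (if pvQ n sm i then [(i, pvJf sm i), (pvJf sm i, i)] else [])) _ ?_]
  · rw [PySem.List.foldl_append_eq_flatMap]; simp
  · intro i hi acc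
    have h1 : 1 ≤ i := (PySem.List.mem_pyRange_one.1 hi).1
    beta_reduce
    rw [← pvInner_eq n sm i h1]
    rw [PySem.List.foldl_congr_mem' _ _
        (fun acc2 j => acc2 ++ (if sm - (i + j) = i * j then [(i, j), (j, i)] else [])) _ ?_]
    · rw [PySem.List.foldl_append_eq_flatMap]
    · intro j _ acc2
      by_cases hc : sm - (i + j) = i * j <;> simp [hc]

theorem pvQ_eq (t i : Int) (hi : 1 ≤ i) :
    PySem.Int.floordiv (t - i) (i + 1) = pvJf t i := by
  rw [PySem.Int.floordiv_eq_ediv_of_pos (by omega : (0:Int) < i + 1)]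
  have h : t - i = (t + 1) + (-1) * (i + 1) := by ring
  rw [h, Int.add_mul_ediv_right _ _ (by omega : i + 1 ≠ 0)]
  unfold pvJf; ring

theorem pvR_iff (t i : Int) (hi : 1 ≤ i) :
    PySem.Int.mod (t - i) (i + 1) = 0 ↔ (i + 1) ∣ (t + 1) := by
  rw [PySem.Int.mod_eq_zero_iff_dvd]
  constructor
  · intro h
    have h2 : t + 1 = (t - i) + (i + 1) := by ring
    rw [h2]; exact dvd_add h (dvd_refl _)
  · intro h
    have h2 : t - i = (t + 1) - (i + 1) := by ring
    rw [h2]; exact dvd_sub h (dvd_refl _)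

theorem pvB_eq (n : Int) :
    remov_nb_alt n = pvT n (PySem.Int.floordiv (n * (n + 1)) 2) := by
  unfold remov_nb_alt pvT
  set t := PySem.Int.floordiv (n * (n + 1)) 2 with ht
  rw [PySem.List.foldl_congr_mem' _ _
      (fun res i => res ++ (if pvP n t i then [(i, pvJf t i)] else [])) _ ?_]
  · rw [PySem.List.foldl_append_eq_flatMap]; simp
  · intro i hi res
    have h1 : 1 ≤ i := (PySem.List.mem_pyRange_one.1 hi).1
    simp only [pvQ_eq t i h1]
    by_cases hp : pvP n t i
    · rw [if_pos hp, if_pos]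
      exact ⟨(pvR_iff t i h1).2 hp.1, hp.2.1, hp.2.2⟩
    · rw [if_neg ?_, if_neg hp, List.append_nil]
      intro ⟨hr, h2, h3⟩
      exact hp ⟨(pvR_iff t i h1).1 hr, h2, h3⟩

theorem pvD_iff (n : Int) :
    D_remov_nb n ↔ ∃ i ∈ PySem.List.pyRange 1 (n + 1),
      (i + 1) * (i + 1) = PySem.Int.floordiv (n * (n + 1)) 2 + 1 := by
  have hfd : PySem.Int.floordiv (n * (n + 1)) 2 = (n * n + n) / 2 := by
    rw [PySem.Int.floordiv_eq_ediv_of_pos (by omega : (0:Int) < 2)]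
    congr 1
    ring
  unfold D_remov_nb
  rw [hfd]
  constructor
  · rintro ⟨i, hi, hsq⟩
    obtain ⟨h1, h2⟩ := Finset.mem_Icc.1 hi
    have h1' : (1:Int) ≤ (i:Int) := by exact_mod_cast h1
    have h2' : (i:Int) ≤ n.toNat := by exact_mod_cast h2
    exact ⟨(i : Int), PySem.List.mem_pyRange_one.2 ⟨h1', by omega⟩, hsq⟩
  · rintro ⟨i, hi, hsq⟩
    obtain ⟨h1, h2⟩ := PySem.List.mem_pyRange_one.1 hi
    refine ⟨i.toNat, Finset.mem_Icc.2 ⟨by omega, by omega⟩, ?_⟩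
    rw [Int.toNat_of_nonneg (by omega : (0:Int) ≤ i)]
    exact hsq

theorem pvT_pairwise (n t : Int) : (pvT n t).Pairwise (fun a b => a.1 < b.1) := by
  unfold pvT
  rw [List.pairwise_flatMap]
  constructor
  · intro i _
    split <;> simp
  · apply (PySem.List.pairwise_lt_pyRange_one 1 (n + 1)).imp
    intro i1 i2 hlt x hx y hy
    have hx1 : x.1 = i1 := by
      revert hx; split <;> simp_all
    have hy1 : y.1 = i2 := by
      revert hy; split <;> simp_all
    rw [hx1, hy1]; exact hlt

theorem pvT2_eq_pvT (n t : Int)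
    (h : ∀ i ∈ PySem.List.pyRange 1 (n + 1), (i + 1) * (i + 1) ≠ t + 1) :
    pvT2 n t = pvT n t := by
  unfold pvT2 pvT
  apply List.flatMap_congr
  intro i hi
  by_cases hp : pvP n t i
  · rw [if_pos hp, if_pos hp, if_neg]
    intro hdiag
    have h1 : 1 ≤ i := (PySem.List.mem_pyRange_one.1 hi).1
    have h2 := (pvKey_iff t i (pvJf t i) h1).1 ⟨hp.1, rfl⟩
    rw [hdiag] at h2
    exact h i hi h2
  · rw [if_neg hp, if_neg hp]

theorem pvT2_longer (n t : Int) (i0 : Int) (h0 : i0 ∈ PySem.List.pyRange 1 (n + 1))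
    (hsq : (i0 + 1) * (i0 + 1) = t + 1) : (pvT n t).length < (pvT2 n t).length := by
  obtain ⟨hi1, hi2⟩ := PySem.List.mem_pyRange_one.1 h0
  have hkey := (pvKey_iff t i0 i0 hi1).2 hsq
  have hP0 : pvP n t i0 := ⟨hkey.1, by omega, by omega⟩
  have hJ0 : pvJf t i0 = i0 := hkey.2.symm
  have hsplit : PySem.List.pyRange 1 (n + 1) =
      PySem.List.pyRange 1 i0 ++ i0 :: PySem.List.pyRange (i0 + 1) (n + 1) := by
    rw [PySem.List.pyRange_one_append 1 i0 (n + 1) (by omega) (by omega),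
      PySem.List.pyRange_one_cons (by omega : i0 < n + 1)]
  unfold pvT pvT2
  rw [hsplit]
  simp only [List.flatMap_append, List.flatMap_cons, List.length_append, List.length_flatMap]
  have hmono : ∀ (l : List Int),
      (l.map (fun i => (if pvP n t i then [(i, pvJf t i)] else []).length)).sum ≤
      (l.map (fun i => (if pvP n t i then (if pvJf t i = i then [(i, i), (i, i)] else [(i, pvJf t i)]) else []).length)).sum := by
    intro l
    apply List.sum_le_sum
    intro i _
    by_cases hp : pvP n t i
    · rw [if_pos hp, if_pos hp]
      split <;> simp
    · rw [if_neg hp, if_neg hp]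
  have hm1 := hmono (PySem.List.pyRange 1 i0)
  have hm2 := hmono (PySem.List.pyRange (i0 + 1) (n + 1))
  rw [if_pos hP0, if_pos hP0, if_pos hJ0]
  simp only [List.length_append, List.length_cons, List.length_nil]
  omega

-- ===== VERDICT (by name: the statement is the Claim_ definition above) =====
theorem remov_nb_spec : Claim_unchanged_remov_nb := by
  unfold Claim_unchanged_remov_nb
  intro n hdom
  unfold Spec_remov_nb
  intro hD
  by_cases hn : n ≤ 0
  · have hnil : PySem.List.pyRange 1 (n + 1) = [] :=
      PySem.List.pyRange_one_eq_nil (by omega)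
    rw [pvA_eq, pvB_eq]
    unfold pvRaw pvT
    rw [hnil]
    rfl
  · have hn0 : 0 ≤ n := by omega
    rw [pvA_eq, pvB_eq, pvSum_eq n hn0]
    set t := PySem.Int.floordiv (n * (n + 1)) 2 with ht
    have hnd : ∀ i ∈ PySem.List.pyRange 1 (n + 1), (i + 1) * (i + 1) ≠ t + 1 := by
      intro i hi hsq
      exact hD ((pvD_iff n).2 ⟨i, hi, hsq⟩)
    have hperm := (pvRaw_perm n t).symm
    rw [pvT2_eq_pvT n t hnd] at hperm
    exact PySem.List.sorted_eq_of_perm_of_pairwise_lt _ _ _ hperm (pvT_pairwise n t)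

theorem remov_nb_changed : Claim_changed_remov_nb := by
  unfold Claim_changed_remov_nb
  refine ⟨by decide, ?_, by decide, by decide, by decide⟩
  show D_remov_nb 2
  unfold D_remov_nb
  exact ⟨1, by decide, by norm_num⟩

theorem remov_nb_tight : Claim_exact_remov_nb := by
  unfold Claim_exact_remov_nb
  intro n hdom hD heq
  obtain ⟨i0, hi0, hsq⟩ := (pvD_iff n).1 hD
  have hn1 : 1 ≤ i0 ∧ i0 < n + 1 := PySem.List.mem_pyRange_one.1 hi0
  have hn0 : 0 ≤ n := by omega
  set t := PySem.Int.floordiv (n * (n + 1)) 2 with ht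
  have hlenA : (remov_nb n).length = (pvT2 n t).length := by
    rw [pvA_eq, PySem.List.length_sorted, pvSum_eq n hn0]
    exact (pvRaw_perm n t).length_eq
  have hlenB : (remov_nb_alt n).length = (pvT n t).length := by rw [pvB_eq]
  have hlt := pvT2_longer n t i0 hi0 hsq
  rw [heq, hlenB] at hlenA
  omega
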